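-- pv_equiv track=rewrite | github.com/Nareeek/Codesignal_tasks | binaryGenerator.py | binaryGenerator
-- ===== SOURCE A (Python) =====
-- from itertools import combinations
--
-- def binaryGenerator(s):
--     pos = set()
--     opt = []
--
--     for i in range(len(s)):
--         if s[i] == '0':
--             pos.add(i)
--
--     for i in range(len(s) + 1):
--         for comb in combinations(pos, i):
--             init = list(s)
--
--             for p in comb:
--                 init[p] = '1'
--
--             opt.append(''.join(init))
--
--     return sorted(opt)
-- ===== SOURCE B (Python) =====
-- def binaryGenerator(s):
--     res = ['']
--     for c in s:
--         opts = ['0', '1'] if c == '0' else [c]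
--         res = [r + o for r in res for o in opts]
--     return sorted(res)
-- ===== Notes on version B (the rewrite author's own statement) =====
-- stated objective: simpler
-- what changed: Replaces the size-by-size enumeration of subsets of zero positions (itertools.combinations plus per-subset list copy and in-place index mutation) by a single left-to-right Cartesian-product pass that branches each zero character both ways; same sorted output.
import Mathlib
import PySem

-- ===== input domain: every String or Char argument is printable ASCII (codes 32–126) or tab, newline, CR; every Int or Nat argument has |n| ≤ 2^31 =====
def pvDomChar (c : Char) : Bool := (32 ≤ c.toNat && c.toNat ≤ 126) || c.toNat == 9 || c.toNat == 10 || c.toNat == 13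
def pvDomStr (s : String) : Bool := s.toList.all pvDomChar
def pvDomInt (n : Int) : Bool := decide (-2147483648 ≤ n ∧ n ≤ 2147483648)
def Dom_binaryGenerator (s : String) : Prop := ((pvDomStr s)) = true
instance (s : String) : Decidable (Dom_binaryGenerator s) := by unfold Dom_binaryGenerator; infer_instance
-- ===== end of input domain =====

-- B replaces A's size-by-size subset enumeration of zero positions by a single
-- left-to-right Cartesian-product pass ('0' branches to '0'/'1'); same sorted output.

-- ===== PORT A =====
-- for p in comb: init[p] = '1'   (indices come from range(len(s)), so always in range)
def pvApply (cs : List Char) (comb : List Nat) : List Char :=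
  comb.foldl (fun init p => init.set p '1') cs

-- pos = set(); for i in range(len(s)): if s[i] == '0': pos.add(i)
-- (i < len(s) throughout, so getD is exact for s[i])
def pvPosPort (cs : List Char) : PySem.Set Nat :=
  (List.range cs.length).foldl
    (fun st i => if cs.getD i ' ' = '0' then PySem.Set.add st i else st) PySem.Set.empty

-- itertools.combinations(pos, i) ported as List.sublistsLen i pos: the same i-element
-- subsets (their enumeration order differs, which the final sorted() cannot observe)
def binaryGenerator (s : String) : List String :=
  PySem.List.sorted
    ((List.range (s.toList.length + 1)).foldl
      (fun opt i => (List.sublistsLen i (pvPosPort s.toList)).foldl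
        (fun opt comb => opt ++ [String.ofList (pvApply s.toList comb)]) opt) [])
    (fun x => x) false

-- ===== PORT B =====
def pvOpts (c : Char) : List Char := if c = '0' then ['0', '1'] else [c]

-- strings are built as Char lists and packed into a String at the end (exact: r + o)
def binaryGenerator_alt (s : String) : List String :=
  PySem.List.sorted
    ((s.toList.foldl
        (fun res c => res.flatMap (fun r => (pvOpts c).map (fun o => r ++ [o])))
        ([[]] : List (List Char))).map String.ofList)
    (fun x => x) false

-- ===== PRECONDITION & SPEC =====
def Spec_binaryGenerator (s : String) (out : List String) : Prop := out = binaryGenerator_alt s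
instance (s : String) (out : List String) : Decidable (Spec_binaryGenerator s out) := by unfold Spec_binaryGenerator; infer_instance

-- ===== CLAIM (what is proved, stated in full; the proofs are below) =====
def Claim_equal_binaryGenerator : Prop := ∀ (s : String), Dom_binaryGenerator s → Spec_binaryGenerator s (binaryGenerator s)

-- ===== LEMMAS AND PROOFS =====

-- the per-position relation both pre-sort lists realise
def pvRel (o c : Char) : Prop := o ∈ pvOpts c

def pvPos (cs : List Char) : List Nat :=
  (List.range cs.length).filter (fun i => decide (cs.getD i ' ' = '0'))

def pvAchars (cs : List Char) : List (List Char) :=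
  (List.range (cs.length + 1)).flatMap (fun i => (List.sublistsLen i (pvPos cs)).map (pvApply cs))

def pvProd (cs : List Char) : List (List Char) :=
  cs.foldl (fun res c => res.flatMap (fun r => (pvOpts c).map (fun o => r ++ [o]))) [[]]

-- pos loop = filter
theorem pvSetFold (p : Nat → Prop) [DecidablePred p] :
    ∀ (l : List Nat) (acc : List Nat), l.Nodup → (∀ x ∈ l, x ∉ acc) →
    l.foldl (fun st i => if p i then PySem.Set.add st i else st) acc
      = acc ++ l.filter (fun i => decide (p i)) := by
  intro l
  induction l with
  | nil => intro acc _ _; simp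
  | cons x t ih =>
    intro acc hnd hdisj
    simp only [List.foldl_cons, List.filter_cons]
    by_cases hp : p x
    · have hx : x ∉ acc := hdisj x (List.mem_cons_self ..)
      have hadd : PySem.Set.add acc x = acc ++ [x] := by
        simp [PySem.Set.add, PySem.Set.contains, hx]
      rw [if_pos hp, hadd, ih _ (List.Nodup.of_cons hnd)]
      · simp [hp]
      · intro y hy
        simp only [List.mem_append, List.mem_singleton]
        rintro (h | rfl)
        · exact hdisj y (List.mem_cons_of_mem _ hy) h
        · exact (List.nodup_cons.1 hnd).1 hy
    · rw [if_neg hp, ih _ (List.Nodup.of_cons hnd)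
        (fun y hy => hdisj y (List.mem_cons_of_mem _ hy))]
      simp [hp]

theorem pvPos_spec (cs : List Char) : pvPosPort cs = pvPos cs := by
  have := pvSetFold (fun i => cs.getD i ' ' = '0') (List.range cs.length) []
    (List.nodup_range) (by simp)
  simpa [pvPosPort, pvPos, PySem.Set.empty] using this

theorem mem_pvPos {cs : List Char} {i : Nat} :
    i ∈ pvPos cs ↔ i < cs.length ∧ cs.getD i ' ' = '0' := by
  simp [pvPos, List.mem_filter, List.mem_range]

theorem pvPos_pairwise (cs : List Char) : (pvPos cs).Pairwise (· < ·) :=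
  List.Pairwise.sublist List.filter_sublist List.pairwise_lt_range

theorem pvApply_length (cs : List Char) (comb : List Nat) :
    (pvApply cs comb).length = cs.length := by
  induction comb generalizing cs with
  | nil => rfl
  | cons q c ih => simp [pvApply, List.foldl_cons] at ih ⊢; rw [ih, List.length_set]

theorem pvApply_getD (comb : List Nat) :
    ∀ (cs : List Char), (∀ q ∈ comb, q < cs.length) → ∀ (i : Nat),
    (pvApply cs comb).getD i ' ' = if i ∈ comb then '1' else cs.getD i ' ' := by
  induction comb with
  | nil => intro cs _ i; simp [pvApply]
  | cons q c ih =>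
    intro cs h i
    have hq : q < cs.length := h q (List.mem_cons_self ..)
    have hstep : pvApply cs (q :: c) = pvApply (cs.set q '1') c := by
      simp [pvApply, List.foldl_cons]
    rw [hstep, ih (cs.set q '1') (by simpa [List.length_set] using fun p hp => h p (List.mem_cons_of_mem _ hp)) i]
    by_cases hic : i ∈ c
    · simp [hic]
    · by_cases hiq : i = q
      · subst hiq
        have h1 : (cs.set i '1').getD i ' ' = '1' := by
          rw [List.getD_eq_getElem _ _ (by simpa using hq)]; simp
        rw [if_neg hic, if_pos (List.mem_cons_self ..), h1]
      · have : (cs.set q '1').getD i ' ' = cs.getD i ' ' := by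
          by_cases hilt : i < cs.length
          · rw [List.getD_eq_getElem _ _ (by simpa [List.length_set] using hilt),
              List.getD_eq_getElem _ _ hilt]
            exact List.getElem_set_ne (fun he => hiq he.symm) _
          · rw [List.getD_eq_default _ _ (by simpa using Nat.le_of_not_lt hilt),
              List.getD_eq_default _ _ (Nat.le_of_not_lt hilt)]
        rw [if_neg hic, if_neg (by simp [hic, hiq]), this]

-- inner/outer foldl-append loops as map / flatMap
theorem pvFoldlPush {α β : Type} (f : α → β) :
    ∀ (l : List α) (acc : List β), l.foldl (fun acc x => acc ++ [f x]) acc = acc ++ l.map f := by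
  intro l
  induction l with
  | nil => simp
  | cons x t ih => intro acc; simp [ih]

theorem pvFoldlFlat {α β : Type} (g : α → List β) :
    ∀ (l : List α) (acc : List β), l.foldl (fun acc x => acc ++ g x) acc = acc ++ l.flatMap g := by
  intro l
  induction l with
  | nil => simp
  | cons x t ih => intro acc; simp [ih]

theorem mem_pvAchars {cs : List Char} {t : List Char} :
    t ∈ pvAchars cs ↔ ∃ c, c.Sublist (pvPos cs) ∧ t = pvApply cs c := by
  unfold pvAchars
  simp only [List.mem_flatMap, List.mem_range, List.mem_map, List.mem_sublistsLen]
  constructor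
  · rintro ⟨i, hi, c, ⟨hsub, rfl⟩, rfl⟩; exact ⟨c, hsub, rfl⟩
  · rintro ⟨c, hsub, rfl⟩
    refine ⟨c.length, ?_, c, ⟨hsub, rfl⟩, rfl⟩
    have h1 := hsub.length_le
    have h2 : (pvPos cs).length ≤ cs.length := by
      simpa [pvPos] using le_trans (List.length_filter_le _ _) (by simp)
    omega

theorem pvApply_mem_imp {cs : List Char} {c1 c2 : List Nat}
    (h1 : c1.Sublist (pvPos cs)) (h2 : c2.Sublist (pvPos cs))
    (he : pvApply cs c1 = pvApply cs c2) : ∀ x, x ∈ c1 → x ∈ c2 := by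
  intro x hx
  have hb1 : ∀ q ∈ c1, q < cs.length := fun q hq => (mem_pvPos.1 (h1.subset hq)).1
  have hb2 : ∀ q ∈ c2, q < cs.length := fun q hq => (mem_pvPos.1 (h2.subset hq)).1
  have hxp := mem_pvPos.1 (h1.subset hx)
  by_contra hx2
  have e1 := pvApply_getD c1 cs hb1 x
  have e2 := pvApply_getD c2 cs hb2 x
  rw [if_pos hx] at e1
  rw [if_neg hx2, hxp.2] at e2
  rw [he, e2] at e1
  exact absurd e1 (by decide)

theorem pvApply_inj {cs : List Char} {c1 c2 : List Nat}
    (h1 : c1.Sublist (pvPos cs)) (h2 : c2.Sublist (pvPos cs))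
    (he : pvApply cs c1 = pvApply cs c2) : c1 = c2 := by
  have hmem : ∀ x, x ∈ c1 ↔ x ∈ c2 := fun x =>
    ⟨pvApply_mem_imp h1 h2 he x, pvApply_mem_imp h2 h1 he.symm x⟩
  have hp1 := List.Pairwise.sublist h1 (pvPos_pairwise cs)
  have hp2 := List.Pairwise.sublist h2 (pvPos_pairwise cs)
  have hperm : c1.Perm c2 := (List.perm_ext_iff_of_nodup hp1.nodup hp2.nodup).2 hmem
  exact hperm.eq_of_pairwise (fun a b _ _ hab hba => absurd hba (Nat.lt_asymm hab)) hp1 hp2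

theorem nodup_pvAchars (cs : List Char) : (pvAchars cs).Nodup := by
  unfold pvAchars
  rw [List.nodup_flatMap]
  constructor
  · intro i _
    exact (List.nodup_sublistsLen i (pvPos_pairwise cs).nodup).map_on
      (fun c1 hc1 c2 hc2 he =>
        pvApply_inj (List.mem_sublistsLen.1 hc1).1 (List.mem_sublistsLen.1 hc2).1 he)
  · have hne : List.Pairwise (· ≠ ·) (List.range (cs.length + 1)) :=
      List.pairwise_lt_range.imp (fun h => Nat.ne_of_lt h)
    refine hne.imp ?_
    intro i j hij
    simp only [Function.onFun, List.Disjoint]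
    intro t ht1 ht2
    simp only [List.mem_map, List.mem_sublistsLen] at ht1 ht2
    obtain ⟨c1, ⟨hs1, hl1⟩, rfl⟩ := ht1
    obtain ⟨c2, ⟨hs2, hl2⟩, he⟩ := ht2
    exact hij (hl1 ▸ hl2 ▸ congrArg List.length (pvApply_inj hs1 hs2 he.symm) ▸ rfl)

theorem pvAchars_spec {cs : List Char} {t : List Char} :
    t ∈ pvAchars cs ↔ List.Forall₂ pvRel t cs := by
  rw [mem_pvAchars]
  constructor
  · rintro ⟨c, hsub, rfl⟩
    have hb : ∀ q ∈ c, q < cs.length := fun q hq => (mem_pvPos.1 (hsub.subset hq)).1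
    rw [List.forall₂_iff_get]
    refine ⟨by simp [pvApply_length], ?_⟩
    intro i h1 h2
    have hg : (pvApply cs c).get ⟨i, h1⟩ = if i ∈ c then '1' else cs[i] := by
      have := pvApply_getD c cs hb i
      rwa [List.getD_eq_getElem _ _ h1, List.getD_eq_getElem _ _ h2] at this
    rw [List.get_eq_getElem] at hg ⊢
    rw [hg]
    by_cases hic : i ∈ c
    · have h0 : cs[i] = '0' := by
        have := (mem_pvPos.1 (hsub.subset hic)).2
        rwa [List.getD_eq_getElem _ _ h2] at this
      simp [pvRel, pvOpts, hic, h0]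
    · simp only [if_neg hic, pvRel, pvOpts]
      split <;> simp_all
  · intro hf
    have hlen := hf.length_eq
    refine ⟨(pvPos cs).filter (fun q => decide (t.getD q ' ' = '1')), List.filter_sublist, ?_⟩
    have hget := (List.forall₂_iff_get.1 hf).2
    have hb : ∀ q ∈ (pvPos cs).filter (fun q => decide (t.getD q ' ' = '1')), q < cs.length :=
      fun q hq => (mem_pvPos.1 (List.mem_of_mem_filter hq)).1
    apply List.ext_getElem (by rw [pvApply_length]; exact hlen)
    intro i h1 h2
    have hi : i < cs.length := by rwa [pvApply_length] at h2
    have hg : (pvApply cs ((pvPos cs).filter (fun q => decide (t.getD q ' ' = '1'))))[i]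
        = if i ∈ (pvPos cs).filter (fun q => decide (t.getD q ' ' = '1')) then '1' else cs[i] := by
      have := pvApply_getD ((pvPos cs).filter (fun q => decide (t.getD q ' ' = '1'))) cs hb i
      rwa [List.getD_eq_getElem _ _ h2, List.getD_eq_getElem _ _ hi] at this
    have hrel : t[i] ∈ pvOpts cs[i] := by
      have := hget i h1 hi
      simpa [pvRel] using this
    rw [hg]
    have hmemf : i ∈ (pvPos cs).filter (fun q => decide (t.getD q ' ' = '1'))
        ↔ (i < cs.length ∧ cs[i] = '0') ∧ t[i] = '1' := by
      rw [List.mem_filter, mem_pvPos, List.getD_eq_getElem _ _ h1]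
      constructor
      · rintro ⟨⟨ha, hb'⟩, hc⟩
        exact ⟨⟨ha, by rwa [List.getD_eq_getElem _ _ hi] at hb'⟩, by simpa using hc⟩
      · rintro ⟨⟨ha, hb'⟩, hc⟩
        exact ⟨⟨ha, by rwa [List.getD_eq_getElem _ _ hi]⟩, by simpa using hc⟩
    by_cases h10 : t[i] = '1' ∧ cs[i] = '0'
    · rw [if_pos (hmemf.2 ⟨⟨hi, h10.2⟩, h10.1⟩), h10.1]
    · rw [if_neg (fun hmem => h10 ⟨(hmemf.1 hmem).2, (hmemf.1 hmem).1.2⟩)]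
      revert hrel
      simp only [pvOpts]
      split
      · rename_i h0
        intro hrel
        rcases List.mem_pair.1 hrel with h | h
        · exact h.symm ▸ h0.symm
        · exact absurd ⟨h, h0⟩ h10
      · intro hrel
        simpa using hrel

-- Forall₂ against an appended singleton
theorem pvForall₂_concat {R : Char → Char → Prop} {t l : List Char} {c : Char} :
    List.Forall₂ R t (l ++ [c]) ↔ ∃ r o, t = r ++ [o] ∧ List.Forall₂ R r l ∧ R o c := by
  constructor
  · intro h
    have h1 := List.forall₂_take_append t l [c] h
    have h2 := List.forall₂_drop_append t l [c] h
    rw [List.forall₂_cons_right_iff] at h2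
    obtain ⟨o, r', ho, hr', hdrop⟩ := h2
    rw [List.forall₂_nil_right_iff] at hr'
    subst hr'
    have ht : t = List.take l.length t ++ [o] := by
      rw [← hdrop, List.take_append_drop]
    exact ⟨List.take l.length t, o, ht, h1, ho⟩
  · rintro ⟨r, o, rfl, h1, h2⟩
    exact List.rel_append h1 (List.Forall₂.cons h2 List.Forall₂.nil)

theorem pvProd_concat (l : List Char) (c : Char) :
    pvProd (l ++ [c]) = (pvProd l).flatMap (fun r => (pvOpts c).map (fun o => r ++ [o])) := by
  simp [pvProd, List.foldl_append]

theorem mem_pvProd {cs : List Char} {t : List Char} :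
    t ∈ pvProd cs ↔ List.Forall₂ pvRel t cs := by
  induction cs using List.reverseRecOn generalizing t with
  | nil =>
    simp only [pvProd, List.foldl_nil, List.mem_singleton, List.forall₂_nil_right_iff]
  | append_singleton l c ih =>
    rw [pvProd_concat, pvForall₂_concat]
    simp only [List.mem_flatMap, List.mem_map]
    constructor
    · rintro ⟨r, hr, o, ho, rfl⟩
      exact ⟨r, o, rfl, ih.1 hr, ho⟩
    · rintro ⟨r, o, rfl, h1, h2⟩
      exact ⟨r, ih.2 h1, o, h2, rfl⟩

theorem nodup_pvOpts (c : Char) : (pvOpts c).Nodup := by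
  unfold pvOpts; split <;> simp

theorem nodup_pvProd (cs : List Char) : (pvProd cs).Nodup := by
  induction cs using List.reverseRecOn with
  | nil => simp [pvProd]
  | append_singleton l c ih =>
    rw [pvProd_concat, List.nodup_flatMap]
    constructor
    · intro r _
      exact (nodup_pvOpts c).map_on
        (fun o1 _ o2 _ he => by simpa using List.append_cancel_left he)
    · refine List.Pairwise.imp_of_mem ?_ ih
      intro r1 r2 hr1 hr2 hne
      simp only [Function.onFun, List.Disjoint]
      intro t ht1 ht2
      simp only [List.mem_map] at ht1 ht2
      obtain ⟨o1, ho1, rfl⟩ := ht1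
      obtain ⟨o2, ho2, he⟩ := ht2
      have hl : r2.length = r1.length := by
        rw [(mem_pvProd.1 hr1).length_eq, (mem_pvProd.1 hr2).length_eq]
      exact hne ((List.append_inj he hl).1.symm)

theorem pvPerm (cs : List Char) : (pvAchars cs).Perm (pvProd cs) := by
  rw [List.perm_ext_iff_of_nodup (nodup_pvAchars cs) (nodup_pvProd cs)]
  intro t
  rw [pvAchars_spec, mem_pvProd]

-- ===== VERDICT (by name: the statement is the Claim_ definition above) =====
theorem binaryGenerator_spec : Claim_equal_binaryGenerator := by
  intro s _
  unfold Spec_binaryGenerator binaryGenerator binaryGenerator_alt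
  rw [pvPos_spec]
  have h1 : ∀ (acc : List String) (i : Nat),
      (List.sublistsLen i (pvPos s.toList)).foldl
        (fun opt comb => opt ++ [String.ofList (pvApply s.toList comb)]) acc
      = acc ++ (List.sublistsLen i (pvPos s.toList)).map
          (fun comb => String.ofList (pvApply s.toList comb)) :=
    fun acc i => pvFoldlPush _ _ _
  simp only [h1]
  rw [show (fun (opt : List String) (i : Nat) => opt ++ (List.sublistsLen i (pvPos s.toList)).map
      (fun comb => String.ofList (pvApply s.toList comb)))
    = (fun (opt : List String) i => opt ++ (fun i => (List.sublistsLen i (pvPos s.toList)).map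
      (fun comb => String.ofList (pvApply s.toList comb))) i) from rfl, pvFoldlFlat]
  have h2 : (List.range (s.toList.length + 1)).flatMap
      (fun i => (List.sublistsLen i (pvPos s.toList)).map
        (fun comb => String.ofList (pvApply s.toList comb)))
      = (pvAchars s.toList).map String.ofList := by
    simp [pvAchars, List.map_flatMap, List.map_map, Function.comp_def]
  rw [List.nil_append, h2]
  exact PySem.List.sorted_eq_sorted_of_perm _ _ _ (fun a b h => h)
    ((pvPerm s.toList).map String.ofList)
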